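-- pv_equiv track=rewrite | github.com/MInD-Laboratory/Pose-Dynamics | nb_utils.py | default_metric
-- ===== SOURCE A (Python) =====
-- from typing import Dict, List, Tuple, Optional, Any
--
-- def default_metric(cols: List[str]) -> str | None:
--     """Select a sensible default metric for analysis.
--
--     Chooses metrics that typically show clear condition effects,
--     preferring blink and mouth RMS metrics.
--
--     Args:
--         cols: List of available metric column names
--
--     Returns:
--         Recommended metric name, or None if no columns available
--
--     Note:
--         Selection priority:
--         1. Specific high-impact metrics (blink_aperture_rms, etc.)
--         2. Any RMS metric
--         3. First available metric
--     """
--     if not cols: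
--         return None
--
--     lowers = [c.lower() for c in cols]
--
--     # Preferred metrics known to show strong condition effects
--     prefs = [
--         "blink_aperture_rms", "mouth_aperture_rms", "center_face_magnitude_rms",
--         "blink_aperture_mean_abs_vel", "mouth_aperture_mean_abs_vel",
--     ]
--
--     # First, try exact matches with preferred metrics
--     for exact in prefs:
--         if exact in lowers:
--             return cols[lowers.index(exact)]
--
--     # Second, try any RMS metric (good for variability analysis)
--     for i, lc in enumerate(lowers):
--         if lc.endswith("_rms"):
--             return cols[i]
--
--     # Finally, just use the first available metric
--     return cols[0]
-- ===== SOURCE B (Python) =====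
-- def default_metric(cols):
--     """Select a sensible default metric for analysis (single keyed pass)."""
--     if not cols:
--         return None
--
--     prefs = [
--         "blink_aperture_rms", "mouth_aperture_rms", "center_face_magnitude_rms",
--         "blink_aperture_mean_abs_vel", "mouth_aperture_mean_abs_vel",
--     ]
--     rank = {p: j for j, p in enumerate(prefs)}
--
--     def key(c):
--         lc = c.lower()
--         if lc in rank:
--             return (0, rank[lc])
--         return (1, 0) if lc.endswith("_rms") else (2, 0)
--
--     keys = [key(c) for c in cols]
--     return cols[keys.index(min(keys))]
-- ===== Notes on version B (the rewrite author's own statement) =====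
-- stated objective: alternative
-- what changed: Replaces A's three sequential scans (pref-by-pref membership+index, then an RMS scan, then fallback) with one keyed pass: each column gets a lexicographic priority key (tier, pref-rank) via a precomputed rank dict, and the column at the first occurrence of the minimal key is returned.
import Mathlib
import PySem

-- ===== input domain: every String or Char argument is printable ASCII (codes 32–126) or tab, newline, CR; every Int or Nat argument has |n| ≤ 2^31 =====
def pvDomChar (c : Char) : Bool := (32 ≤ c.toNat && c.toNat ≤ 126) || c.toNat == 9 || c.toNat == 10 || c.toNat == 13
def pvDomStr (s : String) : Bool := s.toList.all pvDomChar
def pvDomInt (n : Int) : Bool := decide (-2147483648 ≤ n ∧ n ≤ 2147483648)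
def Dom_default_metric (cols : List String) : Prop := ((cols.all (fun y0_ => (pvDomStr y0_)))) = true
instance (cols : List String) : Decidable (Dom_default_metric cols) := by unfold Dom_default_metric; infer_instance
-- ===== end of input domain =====

-- B replaces A's three sequential scans with one keyed pass (a priority key per column, then the first minimum); alternative decomposition, same results.

-- ===== PORT A =====
def prefsA : List String :=
  ["blink_aperture_rms", "mouth_aperture_rms", "center_face_magnitude_rms",
   "blink_aperture_mean_abs_vel", "mouth_aperture_mean_abs_vel"]

def default_metric (cols : List String) : Option String :=
  if cols.isEmpty then none else
  let lowers := cols.map PySem.Str.lower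
  match prefsA.find? (fun exact => lowers.contains exact) with
  | some exact => (PySem.List.index? lowers exact).bind (fun j => cols[j]?)
  | none =>
    match List.findIdx? (fun lc => PySem.Str.endswith lc "_rms") lowers with
    | some i => cols[i]?
    | none => cols[0]?

-- ===== PORT B =====
def pvPrefs : List String :=
  ["blink_aperture_rms", "mouth_aperture_rms", "center_face_magnitude_rms",
   "blink_aperture_mean_abs_vel", "mouth_aperture_mean_abs_vel"]

def pvRank : PySem.Dict String Nat :=
  (PySem.List.enumerate pvPrefs).foldl (fun d jp => d.insert jp.2 jp.1.toNat) PySem.Dict.empty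

def pvKey (c : String) : Nat × Nat :=
  match PySem.Dict.get? pvRank (PySem.Str.lower c) with
  | some j => (0, j)
  | none => if PySem.Str.endswith (PySem.Str.lower c) "_rms" then (1, 0) else (2, 0)

def default_metric_alt (cols : List String) : Option String :=
  if cols.isEmpty then none else
  let keys := cols.map pvKey
  match PySem.List.min2? keys (fun k => k.1) (fun k => k.2) with
  | some m => (PySem.List.index? keys m).bind (fun j => cols[j]?)
  | none => none

-- ===== PRECONDITION & SPEC =====
def Spec_default_metric (cols : List String) (out : Option String) : Prop := out = default_metric_alt cols
instance (cols : List String) (out : Option String) : Decidable (Spec_default_metric cols out) := by unfold Spec_default_metric; infer_instance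

-- ===== CLAIM (what is proved, stated in full; the proofs are below) =====
def Claim_equal_default_metric : Prop := ∀ (cols : List String), Dom_default_metric cols → Spec_default_metric cols (default_metric cols)

-- ===== LEMMAS AND PROOFS =====

-- Python's lexicographic ≤ on the 2-tuple keys
def pvLexLe (a b : Nat × Nat) : Prop := a.1 < b.1 ∨ (a.1 = b.1 ∧ a.2 ≤ b.2)

theorem pvLexLe_trans {a b c : Nat × Nat} (h1 : pvLexLe a b) (h2 : pvLexLe b c) : pvLexLe a c := by
  unfold pvLexLe at *; omega

-- the literal step function of PySem.List.min2? for our key projections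
def pvStep (acc : Option (Nat × Nat)) (x : Nat × Nat) : Option (Nat × Nat) :=
  match acc with
  | none => some x
  | some m => if (decide (x.1 < m.1) || !decide (m.1 < x.1) && decide (x.2 < m.2)) = true then some x else some m

theorem min2?_eq_foldl (ks : List (Nat × Nat)) :
    PySem.List.min2? ks (fun k => k.1) (fun k => k.2) = ks.foldl pvStep none := by
  unfold PySem.List.min2? pvStep
  congr 1
  funext acc x
  cases acc <;> simp

theorem pvStep_go (ks : List (Nat × Nat)) (a : Nat × Nat) :
    ∃ m, ks.foldl pvStep (some a) = some m ∧ (m = a ∨ m ∈ ks) ∧ pvLexLe m a ∧ ∀ y ∈ ks, pvLexLe m y := by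
  induction ks generalizing a with
  | nil => exact ⟨a, rfl, Or.inl rfl, Or.inr ⟨rfl, le_refl _⟩, by simp⟩
  | cons x t ih =>
    simp only [List.foldl_cons]
    have hstep : ∃ a', pvStep (some a) x = some a' ∧ (a' = a ∨ a' = x) ∧ pvLexLe a' a ∧ pvLexLe a' x := by
      unfold pvStep pvLexLe
      by_cases h : (decide (x.1 < a.1) || !decide (a.1 < x.1) && decide (x.2 < a.2)) = true
      · refine ⟨x, by simp [h], Or.inr rfl, ?_, Or.inr ⟨rfl, le_refl _⟩⟩
        simp at h; omega
      · refine ⟨a, by simp [h], Or.inl rfl, Or.inr ⟨rfl, le_refl _⟩, ?_⟩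
        simp at h; omega
    obtain ⟨a', hsa, hor, hle_a, hle_x⟩ := hstep
    rw [hsa]
    obtain ⟨m, hm, hmem, hma', hall⟩ := ih a'
    refine ⟨m, hm, ?_, pvLexLe_trans hma' hle_a, ?_⟩
    · rcases hmem with h | h
      · rcases hor with h2 | h2
        · exact Or.inl (h.trans h2)
        · exact Or.inr (by simp [h, h2])
      · exact Or.inr (by simp [h])
    · intro y hy
      rcases List.mem_cons.mp hy with h | h
      · exact h ▸ pvLexLe_trans hma' hle_x
      · exact hall y h

theorem min2?_spec (ks : List (Nat × Nat)) (hne : ks ≠ []) :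
    ∃ m, PySem.List.min2? ks (fun k => k.1) (fun k => k.2) = some m ∧
      m ∈ ks ∧ ∀ y ∈ ks, pvLexLe m y := by
  match ks with
  | [] => exact absurd rfl hne
  | k :: t =>
    rw [min2?_eq_foldl]
    simp only [List.foldl_cons]
    have hk : pvStep none k = some k := rfl
    rw [hk]
    obtain ⟨m, hm, hmem, hma, hall⟩ := pvStep_go t k
    refine ⟨m, hm, ?_, ?_⟩
    · rcases hmem with h | h
      · simp [h]
      · simp [h]
    · intro y hy
      rcases List.mem_cons.mp hy with h | h
      · exact h ▸ hma
      · exact hall y h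

theorem rank_eq : pvRank = PySem.Dict.mk
    [("blink_aperture_rms", 0), ("mouth_aperture_rms", 1), ("center_face_magnitude_rms", 2),
     ("blink_aperture_mean_abs_vel", 3), ("mouth_aperture_mean_abs_vel", 4)] := by decide

theorem rank_get (lc : String) : PySem.Dict.get? pvRank lc =
    (if "blink_aperture_rms" = lc then some 0
     else if "mouth_aperture_rms" = lc then some 1
     else if "center_face_magnitude_rms" = lc then some 2
     else if "blink_aperture_mean_abs_vel" = lc then some 3
     else if "mouth_aperture_mean_abs_vel" = lc then some 4 else none) := by
  rw [rank_eq]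
  simp only [PySem.Dict.get?_mk_cons, beq_iff_eq]
  rfl

-- exhaustive classification of pvKey's value
theorem key_cases (c : String) :
    (pvKey c = (0, 0) ∧ PySem.Str.lower c = "blink_aperture_rms") ∨
    (pvKey c = (0, 1) ∧ PySem.Str.lower c = "mouth_aperture_rms") ∨
    (pvKey c = (0, 2) ∧ PySem.Str.lower c = "center_face_magnitude_rms") ∨
    (pvKey c = (0, 3) ∧ PySem.Str.lower c = "blink_aperture_mean_abs_vel") ∨
    (pvKey c = (0, 4) ∧ PySem.Str.lower c = "mouth_aperture_mean_abs_vel") ∨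
    (pvKey c = (1, 0) ∧ PySem.Str.lower c ∉ pvPrefs ∧ PySem.Str.endswith (PySem.Str.lower c) "_rms" = true) ∨
    (pvKey c = (2, 0) ∧ PySem.Str.lower c ∉ pvPrefs ∧ PySem.Str.endswith (PySem.Str.lower c) "_rms" = false) := by
  by_cases h0 : "blink_aperture_rms" = PySem.Str.lower c
  · exact Or.inl ⟨by unfold pvKey; rw [rank_get, ← h0]; decide, h0.symm⟩
  by_cases h1 : "mouth_aperture_rms" = PySem.Str.lower c
  · exact Or.inr (Or.inl ⟨by unfold pvKey; rw [rank_get, ← h1]; decide, h1.symm⟩)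
  by_cases h2 : "center_face_magnitude_rms" = PySem.Str.lower c
  · exact Or.inr (Or.inr (Or.inl ⟨by unfold pvKey; rw [rank_get, ← h2]; decide, h2.symm⟩))
  by_cases h3 : "blink_aperture_mean_abs_vel" = PySem.Str.lower c
  · exact Or.inr (Or.inr (Or.inr (Or.inl ⟨by unfold pvKey; rw [rank_get, ← h3]; decide, h3.symm⟩)))
  by_cases h4 : "mouth_aperture_mean_abs_vel" = PySem.Str.lower c
  · exact Or.inr (Or.inr (Or.inr (Or.inr (Or.inl ⟨by unfold pvKey; rw [rank_get, ← h4]; decide, h4.symm⟩))))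
  have n0 : PySem.Str.lower c ≠ "blink_aperture_rms" := fun h => h0 h.symm
  have n1 : PySem.Str.lower c ≠ "mouth_aperture_rms" := fun h => h1 h.symm
  have n2 : PySem.Str.lower c ≠ "center_face_magnitude_rms" := fun h => h2 h.symm
  have n3 : PySem.Str.lower c ≠ "blink_aperture_mean_abs_vel" := fun h => h3 h.symm
  have n4 : PySem.Str.lower c ≠ "mouth_aperture_mean_abs_vel" := fun h => h4 h.symm
  have hget : PySem.Dict.get? pvRank (PySem.Str.lower c) = none := by
    rw [rank_get, if_neg h0, if_neg h1, if_neg h2, if_neg h3, if_neg h4]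
  have hnm : PySem.Str.lower c ∉ pvPrefs := by simp [pvPrefs, n0, n1, n2, n3, n4]
  by_cases he : PySem.Str.endswith (PySem.Str.lower c) "_rms" = true
  · refine Or.inr (Or.inr (Or.inr (Or.inr (Or.inr (Or.inl ⟨?_, hnm, he⟩)))))
    unfold pvKey; rw [hget]
    show (if PySem.Str.endswith (PySem.Str.lower c) "_rms" = true then ((1 : Nat), (0 : Nat)) else (2, 0)) = (1, 0)
    rw [if_pos he]
  · refine Or.inr (Or.inr (Or.inr (Or.inr (Or.inr (Or.inr ⟨?_, hnm, by simpa using he⟩)))))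
    unfold pvKey; rw [hget]
    show (if PySem.Str.endswith (PySem.Str.lower c) "_rms" = true then ((1 : Nat), (0 : Nat)) else (2, 0)) = (2, 0)
    rw [if_neg he]

theorem key_zero_mp (c : String) (r : Nat) (h : pvKey c = (0, r)) :
    r < 5 ∧ pvPrefs[r]? = some (PySem.Str.lower c) := by
  rcases key_cases c with ⟨hk, hl⟩ | ⟨hk, hl⟩ | ⟨hk, hl⟩ | ⟨hk, hl⟩ | ⟨hk, hl⟩ |
      ⟨hk, hl, he⟩ | ⟨hk, hl, he⟩ <;>
    rw [hk] at h <;> simp at h <;> subst h <;>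
    exact ⟨by omega, by simp [pvPrefs, hl]⟩

theorem key_zero_mpr (c : String) (r : Nat) (hr : r < 5)
    (hs : pvPrefs[r]? = some (PySem.Str.lower c)) : pvKey c = (0, r) := by
  interval_cases r
  · have hs' : PySem.Str.lower c = "blink_aperture_rms" := by simpa [pvPrefs] using hs.symm
    unfold pvKey; rw [rank_get, hs']; decide
  · have hs' : PySem.Str.lower c = "mouth_aperture_rms" := by simpa [pvPrefs] using hs.symm
    unfold pvKey; rw [rank_get, hs']; decide
  · have hs' : PySem.Str.lower c = "center_face_magnitude_rms" := by simpa [pvPrefs] using hs.symm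
    unfold pvKey; rw [rank_get, hs']; decide
  · have hs' : PySem.Str.lower c = "blink_aperture_mean_abs_vel" := by simpa [pvPrefs] using hs.symm
    unfold pvKey; rw [rank_get, hs']; decide
  · have hs' : PySem.Str.lower c = "mouth_aperture_mean_abs_vel" := by simpa [pvPrefs] using hs.symm
    unfold pvKey; rw [rank_get, hs']; decide

theorem key_one_mp (c : String) (h : pvKey c = (1, 0)) :
    PySem.Str.lower c ∉ pvPrefs ∧ PySem.Str.endswith (PySem.Str.lower c) "_rms" = true := by
  rcases key_cases c with ⟨hk, hl⟩ | ⟨hk, hl⟩ | ⟨hk, hl⟩ | ⟨hk, hl⟩ | ⟨hk, hl⟩ |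
      ⟨hk, hl, he⟩ | ⟨hk, hl, he⟩ <;> rw [hk] at h <;> simp at h <;> exact ⟨hl, he⟩

theorem key_two_mp (c : String) (h : pvKey c = (2, 0)) :
    PySem.Str.lower c ∉ pvPrefs ∧ PySem.Str.endswith (PySem.Str.lower c) "_rms" = false := by
  rcases key_cases c with ⟨hk, hl⟩ | ⟨hk, hl⟩ | ⟨hk, hl⟩ | ⟨hk, hl⟩ | ⟨hk, hl⟩ |
      ⟨hk, hl, he⟩ | ⟨hk, hl, he⟩ <;> rw [hk] at h <;> simp at h <;> exact ⟨hl, he⟩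

theorem key_shape (c : String) :
    (∃ r, r < 5 ∧ pvKey c = (0, r)) ∨ pvKey c = (1, 0) ∨ pvKey c = (2, 0) := by
  rcases key_cases c with ⟨hk, _⟩ | ⟨hk, _⟩ | ⟨hk, _⟩ | ⟨hk, _⟩ | ⟨hk, _⟩ |
      ⟨hk, _, _⟩ | ⟨hk, _, _⟩
  · exact Or.inl ⟨0, by omega, hk⟩
  · exact Or.inl ⟨1, by omega, hk⟩
  · exact Or.inl ⟨2, by omega, hk⟩
  · exact Or.inl ⟨3, by omega, hk⟩
  · exact Or.inl ⟨4, by omega, hk⟩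
  · exact Or.inr (Or.inl hk)
  · exact Or.inr (Or.inr hk)

-- if no column's key is tier 0, A's preference loop finds nothing
theorem find_none_of (xs : List String)
    (hnokey0 : ∀ (i : Nat) (h : i < xs.length), ∀ t, ¬ pvKey (xs[i]) = (0, t)) :
    prefsA.find? (fun exact => ((xs.map PySem.Str.lower).contains exact)) = none := by
  apply List.find?_eq_none.mpr
  intro e he
  obtain ⟨t, ht, hte⟩ := List.getElem_of_mem he
  simp only [Bool.not_eq_true]
  by_contra hcon
  simp only [Bool.not_eq_false] at hcon
  obtain ⟨i2, hi2, he2⟩ := List.getElem_of_mem (List.contains_iff_mem.mp hcon)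
  have hi2x : i2 < xs.length := by simpa using hi2
  have ht5 : t < 5 := by simpa [prefsA] using ht
  apply hnokey0 i2 hi2x t
  apply key_zero_mpr _ t ht5
  have hlow : PySem.Str.lower (xs[i2]) = pvPrefs[t]'(by simp [pvPrefs]; omega) := by
    rw [← List.getElem_map (f := PySem.Str.lower) (h := hi2), he2, ← hte]
    rfl
  rw [hlow]
  exact List.getElem?_eq_getElem _

theorem main_eq (cols : List String) : default_metric cols = default_metric_alt cols := by
  cases cols with
  | nil => rfl
  | cons c cs =>
    rw [default_metric, default_metric_alt]
    simp only [List.isEmpty_cons, Bool.false_eq_true, if_false]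
    set xs : List String := c :: cs with hxs
    set lowers : List String := xs.map PySem.Str.lower with hL
    set keys : List (Nat × Nat) := xs.map pvKey with hK
    have hLlen : lowers.length = xs.length := by simp [hL]
    have hKlen : keys.length = xs.length := by simp [hK]
    have hLat : ∀ (i : Nat) (h : i < xs.length), lowers[i]'(by omega) = PySem.Str.lower (xs[i]) := by
      intro i h; simp [hL]
    have hKat : ∀ (i : Nat) (h : i < xs.length), keys[i]'(by omega) = pvKey (xs[i]) := by
      intro i h; simp [hK]
    obtain ⟨m, hmin, hmem, hall⟩ := min2?_spec keys (by simp [hK, hxs])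
    rw [hmin]
    obtain ⟨j, hj⟩ : ∃ j, PySem.List.index? keys m = some j := by
      cases h : PySem.List.index? keys m with
      | none => exact absurd ((PySem.List.index?_eq_none_iff keys m).mp h) (by simpa using hmem)
      | some j => exact ⟨j, rfl⟩
    obtain ⟨hjk, hkj, hjmin⟩ := PySem.List.getElem_of_index?_eq_some hj
    have hjx : j < xs.length := by omega
    have hmkey : pvKey (xs[j]) = m := by rw [← hKat j hjx]; exact hkj
    have hallk : ∀ (i : Nat) (h : i < xs.length), pvLexLe m (pvKey (xs[i])) := by
      intro i h
      have hmm : keys[i]'(by omega) ∈ keys := List.getElem_mem _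
      rw [hKat i h] at hmm
      exact hall _ hmm
    rcases key_shape (xs[j]) with ⟨r, hr5, hk0⟩ | hk1 | hk2
    · -- tier 0: a preferred metric is present; A's first loop returns it
      have hm0 : m = (0, r) := by rw [← hmkey, hk0]
      obtain ⟨_, hsome⟩ := key_zero_mp _ r hk0
      obtain ⟨hrlen, hpr⟩ := List.getElem?_eq_some_iff.mp hsome
      have hfind : prefsA.find? (fun exact => lowers.contains exact) = some (pvPrefs[r]'hrlen) := by
        apply List.find?_eq_some_iff_append.mpr
        refine ⟨?_, prefsA.take r, prefsA.drop (r + 1), ?_, ?_⟩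
        · apply List.contains_iff_mem.mpr
          have hlj : lowers[j]'(by omega) = pvPrefs[r]'hrlen := by rw [hLat j hjx, ← hpr]
          rw [← hlj]; exact List.getElem_mem _
        · conv_lhs => rw [← List.take_append_drop r prefsA,
            List.drop_eq_getElem_cons (show r < prefsA.length from hrlen)]
          rfl
        · intro a ha
          obtain ⟨i, hilt, hia⟩ := List.getElem_of_mem ha
          have hir : i < r := by
            have h5 := hilt; simp [List.length_take] at h5; omega
          have hi5 : i < 5 := by have := hrlen; simp [pvPrefs] at this; omega
          have hia' : prefsA[i]'(by simp [prefsA]; omega) = a := by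
            rw [← hia]; exact (List.getElem_take).symm
          simp only [Bool.not_eq_true']
          by_contra hcon
          simp only [Bool.not_eq_false] at hcon
          obtain ⟨i2, hi2, he2⟩ := List.getElem_of_mem (List.contains_iff_mem.mp hcon)
          have hi2x : i2 < xs.length := by omega
          have hkey2 : pvKey (xs[i2]) = (0, i) := by
            apply key_zero_mpr _ i hi5
            have hlow : PySem.Str.lower (xs[i2]) = pvPrefs[i]'(by simp [pvPrefs]; omega) := by
              rw [← hLat i2 hi2x, he2, ← hia']
              rfl
            rw [hlow]
            exact List.getElem?_eq_getElem _
          have hcontr := hallk i2 hi2x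
          rw [hkey2, hm0] at hcontr
          unfold pvLexLe at hcontr
          simp at hcontr
          omega
      have hidx : PySem.List.index? lowers (pvPrefs[r]'hrlen) = some j := by
        rw [PySem.List.index?_eq_idxOf?]
        apply List.idxOf?_eq_some_iff.mpr
        refine ⟨by omega, by rw [hLat j hjx, ← hpr], ?_⟩
        intro i hij
        have hix : i < xs.length := by omega
        intro hcon
        have hkey2 : pvKey (xs[i]) = (0, r) := by
          apply key_zero_mpr _ r hr5
          rw [← hLat i hix, hcon]
          exact List.getElem?_eq_getElem _
        apply hjmin i hij
        rw [hKat i hix, hkey2, ← hm0]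
      rw [hfind]
      show (PySem.List.index? lowers (pvPrefs[r]'hrlen)).bind (fun j => xs[j]?) =
        (PySem.List.index? keys m).bind (fun j => xs[j]?)
      rw [hidx, hj]
    · -- tier 1: no preferred metric; column j is the first RMS metric
      have hm1 : m = (1, 0) := by rw [← hmkey, hk1]
      obtain ⟨hnm, hrms⟩ := key_one_mp _ hk1
      have hnokey0 : ∀ (i : Nat) (h : i < xs.length), ∀ t, ¬ pvKey (xs[i]) = (0, t) := by
        intro i h t hk
        have hcontr := hallk i h
        rw [hk, hm1] at hcontr
        unfold pvLexLe at hcontr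
        simp at hcontr
      have hfind : prefsA.find? (fun exact => lowers.contains exact) = none := by
        rw [hL]; exact find_none_of xs hnokey0
      have hfidx : List.findIdx? (fun lc => PySem.Str.endswith lc "_rms") lowers = some j := by
        rw [List.findIdx?_eq_some_iff_findIdx_eq]
        refine ⟨by omega, (List.findIdx_eq (by omega)).mpr ⟨?_, ?_⟩⟩
        · rw [hLat j hjx]; exact hrms
        · intro i hij
          have hix : i < xs.length := by omega
          rw [hLat i hix]
          rcases key_shape (xs[i]) with ⟨r, hr5, hk⟩ | hk | hk
          · exact absurd hk (hnokey0 i hix r)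
          · exfalso
            apply hjmin i hij
            rw [hKat i hix, hk, ← hm1]
          · exact (key_two_mp _ hk).2
      rw [hfind]
      show (match List.findIdx? (fun lc => PySem.Str.endswith lc "_rms") lowers with
            | some i => xs[i]? | none => xs[0]?) =
        (PySem.List.index? keys m).bind (fun j => xs[j]?)
      rw [hfidx, hj]
      rfl
    · -- tier 2: neither preferred nor RMS; both return the first column
      have hm2 : m = (2, 0) := by rw [← hmkey, hk2]
      have hallk2 : ∀ (i : Nat) (h : i < xs.length), pvKey (xs[i]) = (2, 0) := by
        intro i h
        rcases key_shape (xs[i]) with ⟨r, hr5, hk⟩ | hk | hk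
        · have hcontr := hallk i h; rw [hk, hm2] at hcontr
          unfold pvLexLe at hcontr; simp at hcontr
        · have hcontr := hallk i h; rw [hk, hm2] at hcontr
          unfold pvLexLe at hcontr; simp at hcontr
        · exact hk
      have hnokey0 : ∀ (i : Nat) (h : i < xs.length), ∀ t, ¬ pvKey (xs[i]) = (0, t) := by
        intro i h t hk
        rw [hallk2 i h] at hk
        simp at hk
      have hfind : prefsA.find? (fun exact => lowers.contains exact) = none := by
        rw [hL]; exact find_none_of xs hnokey0
      have hfidx : List.findIdx? (fun lc => PySem.Str.endswith lc "_rms") lowers = none := by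
        apply List.findIdx?_eq_none_iff.mpr
        intro x hx
        obtain ⟨i2, hi2, he2⟩ := List.getElem_of_mem hx
        have hi2x : i2 < xs.length := by omega
        rw [← he2, hLat i2 hi2x]
        exact (key_two_mp _ (hallk2 i2 hi2x)).2
      have hj0 : j = 0 := by
        by_contra hne
        apply hjmin 0 (by omega)
        rw [hKat 0 (by simp [hxs]), hallk2 0 (by simp [hxs]), ← hm2]
      subst hj0
      rw [hfind]
      show (match List.findIdx? (fun lc => PySem.Str.endswith lc "_rms") lowers with
            | some i => xs[i]? | none => xs[0]?) =
        (PySem.List.index? keys m).bind (fun j => xs[j]?)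
      rw [hfidx, hj]
      rfl

-- ===== VERDICT (by name: the statement is the Claim_ definition above) =====
theorem default_metric_spec : Claim_equal_default_metric := by
  intro cols _
  unfold Spec_default_metric
  exact main_eq cols
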